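-- pv_equiv track=rewrite | github.com/yhyoscar/codingpractice | python/cci_8.8_eightqueens.py | check_available
-- ===== SOURCE A (Python) =====
-- def check_available(icol, irows=[], n=8):
--     okrow = list(range(n))
--     if len(irows) > 0:
--         for j in range(len(irows)):
--             if irows[j] in okrow:
--                 okrow.remove(irows[j])
--             if irows[j] - (icol-j) >= 0 and irows[j]-(icol-j) in okrow:
--                 okrow.remove(irows[j]-(icol-j))
--             if irows[j] + (icol-j) < n and irows[j]+(icol-j) in okrow:
--                 okrow.remove(irows[j]+(icol-j))
--     return okrow
-- ===== SOURCE B (Python) =====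
-- def check_available(icol, irows=[], n=8):
--     blocked = set()
--     for j, q in enumerate(irows):
--         blocked.add(q)
--         blocked.add(q - (icol - j))
--         blocked.add(q + (icol - j))
--     return [r for r in range(n) if r not in blocked]
-- ===== Notes on version B (the rewrite author's own statement) =====
-- stated objective: faster
-- what changed: Inverts A's structure: instead of removing attacked rows from the full row list while scanning each placed queen (membership test + remove per queen and diagonal), B builds the set of blocked rows (queen row and both diagonal hits per queen) in one pass and then keeps each row of range(n) not in that set.
import Mathlib
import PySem

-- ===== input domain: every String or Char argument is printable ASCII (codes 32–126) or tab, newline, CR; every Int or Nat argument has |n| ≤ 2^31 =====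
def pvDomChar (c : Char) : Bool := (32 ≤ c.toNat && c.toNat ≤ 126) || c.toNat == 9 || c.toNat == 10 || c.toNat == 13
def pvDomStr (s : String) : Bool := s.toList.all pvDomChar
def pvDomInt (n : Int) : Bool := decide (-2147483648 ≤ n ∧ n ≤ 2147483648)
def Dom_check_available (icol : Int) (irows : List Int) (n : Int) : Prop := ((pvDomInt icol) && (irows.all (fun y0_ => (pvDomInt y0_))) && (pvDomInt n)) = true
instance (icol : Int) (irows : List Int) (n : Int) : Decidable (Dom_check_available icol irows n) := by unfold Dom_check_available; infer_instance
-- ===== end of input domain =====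

-- B replaces A's remove-from-list loop over placed queens by a per-candidate-row
-- conflict test over all queens (loop nesting inverted); return value equivalence only.
-- ===== PORT A =====
-- one body of A's loop: remove the queen's row, then each of its two diagonal cells
def caStep (icol : Int) (n : Int) (ok : List Int) (j : Int) (q : Int) : List Int :=
  let ok1 := if ok.contains q then (PySem.List.remove? ok q).getD ok else ok
  let ok2 := if q - (icol - j) ≥ 0 ∧ ok1.contains (q - (icol - j)) then
      (PySem.List.remove? ok1 (q - (icol - j))).getD ok1 else ok1
  if q + (icol - j) < n ∧ ok2.contains (q + (icol - j)) then
      (PySem.List.remove? ok2 (q + (icol - j))).getD ok2 else ok2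

def check_available (icol : Int) (irows : List Int) (n : Int) : List Int :=
  let okrow := PySem.List.pyRange 0 n 1
  if irows.length > 0 then
    (PySem.List.pyRange 0 (PySem.List.len irows) 1).foldl
      (fun ok j => caStep icol n ok j (PySem.List.pyGetD irows j 0)) okrow
  else okrow

-- ===== PORT B =====
def check_available_alt (icol : Int) (irows : List Int) (n : Int) : List Int :=
  let blocked : PySem.Set Int := (PySem.List.enumerate irows 0).foldl
    (fun s p => PySem.Set.add (PySem.Set.add (PySem.Set.add s p.2)
      (p.2 - (icol - p.1))) (p.2 + (icol - p.1))) PySem.Set.empty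
  (PySem.List.pyRange 0 n 1).filter (fun r => !(PySem.Set.contains blocked r))

-- ===== PRECONDITION & SPEC =====
def Spec_check_available (icol : Int) (irows : List Int) (n : Int) (out : List Int) : Prop := out = check_available_alt icol irows n
instance (icol : Int) (irows : List Int) (n : Int) (out : List Int) : Decidable (Spec_check_available icol irows n out) := by unfold Spec_check_available; infer_instance

-- ===== CLAIM (what is proved, stated in full; the proofs are below) =====
def Claim_equal_check_available : Prop := ∀ (icol : Int) (irows : List Int) (n : Int), Dom_check_available icol irows n → Spec_check_available icol irows n (check_available icol irows n)

-- ===== LEMMAS AND PROOFS =====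

-- ===== VERDICT (by name: the statement is the Claim_ definition above) =====

-- conditional remove on a Nodup list is filter (· ≠ v)
lemma condRemove_eq_filter (L : List Int) (v : Int) (hnd : L.Nodup) :
    (if L.contains v then (PySem.List.remove? L v).getD L else L)
      = L.filter (fun r => decide (r ≠ v)) := by
  by_cases hv : v ∈ L
  · simp only [List.contains_eq_mem, hv, decide_true, if_true,
      PySem.List.remove?_eq_some_erase L v hv, Option.getD_some]
    rw [List.Nodup.erase_eq_filter hnd]
    apply List.filter_congr
    intro x _
    by_cases h : x = v
    · subst h; simp
    · simp [bne_iff_ne, h]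
  · simp only [List.contains_eq_mem, hv, decide_false]
    exact (List.filter_eq_self.mpr (fun a ha => by simp; rintro rfl; exact hv ha)).symm

-- one loop body of A equals filtering by B's conflict predicate, on an in-range Nodup list
lemma caStep_eq_filter (icol n j q : Int) (L : List Int) (hnd : L.Nodup)
    (hb : ∀ x ∈ L, 0 ≤ x ∧ x < n) :
    caStep icol n L j q
      = L.filter (fun r => r ≠ q && r ≠ q - (icol - j) && r ≠ q + (icol - j)) := by
  show (if _ then _ else _) = _
  rw [condRemove_eq_filter L q hnd]
  set L1 := L.filter (fun r => decide (r ≠ q)) with hL1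
  have hnd1 : L1.Nodup := hnd.filter _
  have hb1 : ∀ x ∈ L1, 0 ≤ x ∧ x < n := fun x hx => hb x (List.mem_of_mem_filter hx)
  have h2 : (if q - (icol - j) ≥ 0 ∧ L1.contains (q - (icol - j)) then
      (PySem.List.remove? L1 (q - (icol - j))).getD L1 else L1)
      = L1.filter (fun r => decide (r ≠ q - (icol - j))) := by
    by_cases hd : q - (icol - j) ≥ 0
    · simp only [hd, true_and]
      exact condRemove_eq_filter L1 _ hnd1
    · have hnm : q - (icol - j) ∉ L1 := fun hm => hd (hb1 _ hm).1
      simp only [hd, false_and, if_false]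
      exact (List.filter_eq_self.mpr (fun a ha => by simp; rintro rfl; exact hnm ha)).symm
  rw [h2]
  set L2 := L1.filter (fun r => decide (r ≠ q - (icol - j))) with hL2
  have hnd2 : L2.Nodup := hnd1.filter _
  have hb2 : ∀ x ∈ L2, 0 ≤ x ∧ x < n := fun x hx => hb1 x (List.mem_of_mem_filter hx)
  have h3 : (if q + (icol - j) < n ∧ L2.contains (q + (icol - j)) then
      (PySem.List.remove? L2 (q + (icol - j))).getD L2 else L2)
      = L2.filter (fun r => decide (r ≠ q + (icol - j))) := by
    by_cases he : q + (icol - j) < n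
    · simp only [he, true_and]
      exact condRemove_eq_filter L2 _ hnd2
    · have hnm : q + (icol - j) ∉ L2 := fun hm => he (hb2 _ hm).2
      simp only [he, false_and, if_false]
      exact (List.filter_eq_self.mpr (fun a ha => by simp; rintro rfl; exact hnm ha)).symm
  rw [h3, hL2, hL1, List.filter_filter, List.filter_filter]
  apply List.filter_congr
  intro x _
  simp [Bool.and_comm, Bool.and_left_comm]

-- A's whole loop over the enumerated queens equals one filter by B's all-queens test
lemma loop_eq_filter (icol n : Int) :
    ∀ (qs : List (Int × Int)) (L : List Int), L.Nodup → (∀ x ∈ L, 0 ≤ x ∧ x < n) →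
    qs.foldl (fun ok p => caStep icol n ok p.1 p.2) L
      = L.filter (fun r => qs.all (fun p =>
          r ≠ p.2 && r ≠ p.2 - (icol - p.1) && r ≠ p.2 + (icol - p.1))) := by
  intro qs
  induction qs with
  | nil => intro L _ _; simp
  | cons p qs ih =>
    intro L hnd hb
    simp only [List.foldl_cons, List.all_cons]
    rw [caStep_eq_filter icol n p.1 p.2 L hnd hb,
        ih _ (hnd.filter _) (fun x hx => hb x (List.mem_of_mem_filter hx)),
        List.filter_filter]
    apply List.filter_congr
    intro x _
    exact Bool.and_comm _ _

-- membership in B's blocked set: some queen attacks the row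
lemma mem_blocked (icol : Int) :
    ∀ (qs : List (Int × Int)) (s : PySem.Set Int) (x : Int),
    x ∈ qs.foldl (fun s p => PySem.Set.add (PySem.Set.add (PySem.Set.add s p.2)
        (p.2 - (icol - p.1))) (p.2 + (icol - p.1))) s
      ↔ x ∈ s ∨ ∃ p ∈ qs, x = p.2 ∨ x = p.2 - (icol - p.1) ∨ x = p.2 + (icol - p.1) := by
  intro qs
  induction qs with
  | nil => intro s x; simp
  | cons p qs ih =>
    intro s x
    simp only [List.foldl_cons, ih, PySem.Set.mem_add, List.mem_cons]
    aesop

theorem check_available_spec : Claim_equal_check_available := by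
  intro icol irows n _
  unfold Spec_check_available check_available check_available_alt
  have hfold : ∀ (L : List Int),
      (PySem.List.pyRange 0 (PySem.List.len irows) 1).foldl
        (fun ok j => caStep icol n ok j (PySem.List.pyGetD irows j 0)) L
      = (PySem.List.enumerate irows 0).foldl (fun ok p => caStep icol n ok p.1 p.2) L := by
    intro L
    rw [PySem.List.enumerate_eq_map_pyRange irows 0, List.foldl_map]
  by_cases h : irows.length > 0
  · simp only [h, if_true]
    rw [hfold, loop_eq_filter icol n _ _ (PySem.List.nodup_pyRange_one 0 n)
      (fun x hx => by
        have := (PySem.List.mem_pyRange_one).mp hx; exact ⟨this.1, this.2⟩)]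
    apply List.filter_congr
    intro x _
    rw [Bool.eq_iff_iff]
    simp only [List.all_eq_true, Bool.and_eq_true, decide_eq_true_eq, Bool.not_eq_true',
      ← Bool.not_eq_true, PySem.Set.contains_iff, mem_blocked]
    constructor
    · intro h hc
      rcases hc with h0 | ⟨p, hp, hx⟩
      · exact absurd h0 (by simp [PySem.Set.empty])
      · rcases (h p hp) with ⟨⟨h1, h2⟩, h3⟩
        rcases hx with rfl | rfl | rfl
        · exact h1 rfl
        · exact h2 rfl
        · exact h3 rfl
    · intro h p hp
      refine ⟨⟨fun he => h (Or.inr ⟨p, hp, Or.inl he⟩),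
        fun he => h (Or.inr ⟨p, hp, Or.inr (Or.inl he)⟩)⟩,
        fun he => h (Or.inr ⟨p, hp, Or.inr (Or.inr he)⟩)⟩
  · simp only [h, if_false]
    have : irows = [] := List.eq_nil_of_length_eq_zero (by omega)
    subst this
    simp [PySem.List.enumerate]
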